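-- pv_equiv track=rewrite | github.com/docToolchain/aoc-2022 | day01/python/ceedee666/day_01.py | group_calories_by_elve
-- ===== SOURCE A (Python) =====
-- def group_calories_by_elve(data):
--     calories = []
--     group = []
--
--     for e in data:
--         if e == "":
--             calories.append(group)
--             group = []
--         else:
--             group.append(int(e))
--
--     return calories
-- ===== SOURCE B (Python) =====
-- def group_calories_by_elve(data):
--     # Convert everything up front (separators marked None), then slice between
--     # separator positions instead of accumulating element-by-element.
--     nums = [None if e == "" else int(e) for e in data]
--     calories = []
--     start = 0
--     for i, e in enumerate(data):
--         if e == "":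
--             calories.append(nums[start:i])
--             start = i + 1
--     return calories
-- ===== Notes on version B (the rewrite author's own statement) =====
-- stated objective: alternative
-- what changed: B converts all elements up front into a parallel list marking separators, records group boundaries while scanning separator positions, and emits each group as a slice nums[start:i], instead of A's element-by-element accumulation into a growing group list.
import Mathlib
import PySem

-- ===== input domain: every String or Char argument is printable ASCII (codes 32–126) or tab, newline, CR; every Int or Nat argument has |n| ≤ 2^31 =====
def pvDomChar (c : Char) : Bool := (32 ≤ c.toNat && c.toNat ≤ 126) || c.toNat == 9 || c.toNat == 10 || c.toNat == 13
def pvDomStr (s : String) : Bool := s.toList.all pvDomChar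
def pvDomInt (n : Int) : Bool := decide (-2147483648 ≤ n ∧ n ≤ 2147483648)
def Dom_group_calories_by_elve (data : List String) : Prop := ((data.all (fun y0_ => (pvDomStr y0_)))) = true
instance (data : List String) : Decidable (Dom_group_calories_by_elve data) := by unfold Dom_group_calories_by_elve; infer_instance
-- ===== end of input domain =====

-- B slices a precomputed parallel int list between recorded separator positions instead of
-- A's element-by-element group accumulation; same O(n) cost, different decomposition.

-- int(e); `none` (Python ValueError) is excluded by Pre_, so the total getD 0 form is exact there.
def pyInt (e : String) : Int := (PySem.Int.ofStr? e).getD 0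

-- ===== PORT A =====
def group_calories_by_elve (data : List String) : List (List Int) :=
  (data.foldl
    (fun (st : List (List Int) × List Int) e =>
      if e = "" then (st.1 ++ [st.2], []) else (st.1, st.2 ++ [pyInt e]))
    ([], [])).1

-- ===== PORT B =====
-- nums keeps `none` for separators and int(e) for the rest; a slice's entries are all
-- non-separators, unwrapped with getD 0 (exact under Pre_, where every parse succeeds).
def group_calories_by_elve_alt (data : List String) : List (List Int) :=
  let nums : List (Option Int) := data.map (fun e => if e = "" then none else PySem.Int.ofStr? e)
  ((PySem.List.enumerate data 0).foldl
    (fun (st : List (List Int) × Int) p =>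
      if p.2 = "" then
        (st.1 ++ [(PySem.List.slice nums (some st.2) (some p.1)).map (fun o => o.getD 0)], p.1 + 1)
      else st)
    ([], 0)).1

-- ===== PRECONDITION & SPEC =====
-- Pre_: every non-empty element parses as a Python int — on any other input both Pythons raise ValueError.
def Pre_group_calories_by_elve (data : List String) : Prop :=
  ∀ e ∈ data, e ≠ "" → (PySem.Int.ofStr? e).isSome = true
instance (data : List String) : Decidable (Pre_group_calories_by_elve data) := by
  unfold Pre_group_calories_by_elve; infer_instance
def pvWitness_group_calories_by_elve : List String := ["1", "2", "", "3"]

def Spec_group_calories_by_elve (data : List String) (out : List (List Int)) : Prop := out = group_calories_by_elve_alt data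
instance (data : List String) (out : List (List Int)) : Decidable (Spec_group_calories_by_elve data out) := by unfold Spec_group_calories_by_elve; infer_instance

-- ===== CLAIM (what is proved, stated in full; the proofs are below) =====
def Claim_equal_group_calories_by_elve : Prop := ∀ (data : List String), Dom_group_calories_by_elve data → Pre_group_calories_by_elve data → Spec_group_calories_by_elve data (group_calories_by_elve data)

-- ===== LEMMAS AND PROOFS =====

-- the common recursive shape: pending group g, remaining elements; the trailing group is dropped
def pvAux (g : List Int) : List String → List (List Int)
  | [] => []
  | e :: tl => if e = "" then g :: pvAux [] tl else pvAux (g ++ [pyInt e]) tl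

theorem pvFoldA (data : List String) : ∀ (cal : List (List Int)) (g : List Int),
    (data.foldl
      (fun (st : List (List Int) × List Int) e =>
        if e = "" then (st.1 ++ [st.2], []) else (st.1, st.2 ++ [pyInt e]))
      (cal, g)).1 = cal ++ pvAux g data := by
  induction data with
  | nil => simp [pvAux]
  | cons e tl ih =>
      intro cal g
      by_cases he : e = "" <;> simp [pvAux, he, ih]

theorem pvFoldB (nums : List (Option Int)) (data : List String) :
    ∀ (k s : Nat) (out : List (List Int)),
    s ≤ k →
    nums.drop k = data.map (fun e => if e = "" then none else PySem.Int.ofStr? e) →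
    ((PySem.List.enumerate data (k : Int)).foldl
      (fun (st : List (List Int) × Int) p =>
        if p.2 = "" then
          (st.1 ++ [(PySem.List.slice nums (some st.2) (some p.1)).map (fun o => o.getD 0)], p.1 + 1)
        else st)
      (out, (s : Int))).1
    = out ++ pvAux (((nums.drop s).take (k - s)).map (fun o => o.getD 0)) data := by
  induction data with
  | nil => intro k s out _ _; simp [pvAux]
  | cons e tl ih =>
      intro k s out hsk hdrop
      have hk : k < nums.length := by
        have := congrArg List.length hdrop
        simp at this; omega
      have hnk : nums[k]? = some (if e = "" then none else PySem.Int.ofStr? e) := by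
        have h0 : (nums.drop k)[0]? = nums[k]? := by
          simp [List.getElem?_drop]
        rw [← h0, hdrop]; simp
      have hdrop' : nums.drop (k + 1) = tl.map (fun e => if e = "" then none else PySem.Int.ofStr? e) := by
        have : nums.drop (k+1) = (nums.drop k).drop 1 := by
          rw [List.drop_drop]
        rw [this, hdrop]; simp
      rw [PySem.List.enumerate_cons]
      by_cases he : e = ""
      · -- separator at index k: emit slice [s,k), restart at s = k+1
        simp only [List.foldl_cons, he, if_true, if_false]
        have hcast : ((k : Int) + 1) = ((k + 1 : Nat) : Int) := by push_cast; ring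
        rw [PySem.List.slice_natCast, hcast, ih (k+1) (k+1) _ (le_refl _) hdrop']
        simp [pvAux, he]
      · -- non-separator: pending slice grows by one element
        simp only [List.foldl_cons, he, if_true, if_false]
        have hcast : ((k : Int) + 1) = ((k + 1 : Nat) : Int) := by push_cast; ring
        rw [hcast, ih (k+1) s _ (by omega) hdrop']
        have htake : (nums.drop s).take (k + 1 - s) = (nums.drop s).take (k - s) ++ [if e = "" then none else PySem.Int.ofStr? e] := by
          have hlen : k - s < (nums.drop s).length := by simp; omega
          have hel : (nums.drop s)[k - s]? = nums[k]? := by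
            rw [List.getElem?_drop]; congr 1; omega
          have : k + 1 - s = (k - s) + 1 := by omega
          rw [this, List.take_succ, hel, hnk]
          simp
        rw [htake]
        simp [pvAux, he, pyInt]

-- ===== VERDICT (by name: the statement is the Claim_ definition above) =====
theorem group_calories_by_elve_spec : Claim_equal_group_calories_by_elve := by
  intro data _ _
  have h := pvFoldB (data.map (fun e => if e = "" then none else PySem.Int.ofStr? e)) data 0 0 []
    (le_refl _) (by simp)
  simp only [Nat.cast_zero, List.drop_zero, List.nil_append] at h
  unfold Spec_group_calories_by_elve group_calories_by_elve group_calories_by_elve_alt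
  rw [pvFoldA data [] []]
  simp only [List.nil_append]
  exact h.symm
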